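-- pv_equiv track=rewrite | github.com/ArthurVigier/taxifare-website | app.py | transform_text
-- ===== SOURCE A (Python) =====
-- def transform_text(text: str) -> str:
--     if not text:
--         return text
--
--     # Shift César basé sur longueur
--     shift = (len(text) % 26) + 1
--     result = []
--     for idx, c in enumerate(text.lower()):
--         if c.isalpha():
--             # César
--             base = ord('a')
--             shifted = chr((ord(c) - base + shift) % 26 + base)
--             # Substitution lettre → chiffre si condition
--             if (idx + shift) % 7 == 0:
--                 num = (ord(shifted) - ord('a') + 1) % 10
--                 result.append(str(num))
--             else:
--                 result.append(shifted)
--         else: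
--             result.append(c)
--
--     s = "".join(result).upper()
--
--     # Inversion partielle de segments (tous les 5-8 chars)
--     flip_freq = 5 + (len(s) % 4)
--     parts = [s[i:i+flip_freq] for i in range(0, len(s), flip_freq)]
--     for i in range(len(parts)):
--         if i % 2 == 1:
--             parts[i] = parts[i][::-1]
--     return "".join(parts)
-- ===== SOURCE B (Python) =====
-- def transform_text(text: str) -> str:
--     # Fused single pass: each char is mapped directly to its final (uppercase or
--     # digit) form, then the list is consumed chunk by chunk with an alternating
--     # reverse flag -- no intermediate lowered/uppercased strings, no index ranges.
--     if not text:
--         return text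
--     n = len(text)
--     shift = (n % 26) + 1
--     flip = 5 + (n % 4)
--
--     def enc(idx: int, ch: str) -> str:
--         c = ch.lower()
--         if c.isalpha():
--             v = (ord(c) - ord('a') + shift) % 26
--             if (idx + shift) % 7 == 0:
--                 return chr(ord('0') + (v + 1) % 10)
--             return chr(ord('A') + v)
--         return ch
--
--     t = [enc(i, c) for i, c in enumerate(text)]
--     out = []
--     rev = False
--     while t:
--         chunk = t[:flip]
--         out.append(''.join(reversed(chunk)) if rev else ''.join(chunk))
--         t = t[flip:]
--         rev = not rev
--     return ''.join(out)
-- ===== Notes on version B (the rewrite author's own statement) =====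
-- stated objective: alternative
-- what changed: B fuses A's three string passes (lower+shift loop, whole-string upper, slice-into-parts with in-place odd reversal) into one per-char encoder producing final uppercase/digit chars directly, followed by a single chunk-consuming loop with an alternating reverse flag.
import Mathlib
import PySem

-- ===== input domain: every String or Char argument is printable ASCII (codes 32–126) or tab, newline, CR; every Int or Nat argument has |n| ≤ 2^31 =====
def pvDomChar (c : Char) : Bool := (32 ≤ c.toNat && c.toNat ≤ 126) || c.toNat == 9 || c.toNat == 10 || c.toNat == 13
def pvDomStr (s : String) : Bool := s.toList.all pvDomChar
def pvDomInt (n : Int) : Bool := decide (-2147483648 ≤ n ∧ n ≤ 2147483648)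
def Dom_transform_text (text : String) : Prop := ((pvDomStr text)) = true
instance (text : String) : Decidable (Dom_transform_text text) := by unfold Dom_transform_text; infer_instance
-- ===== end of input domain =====

-- B fuses A's three passes (shift loop on the lowered string, whole-string upper,
-- slice-into-parts with odd-block reversal) into one per-char encoder plus a single
-- chunk-consuming loop with an alternating reverse flag; same cost, different shape.

-- ===== PORT A =====
def transform_text (text : String) : String :=
  let cs := text.toList
  if cs = [] then text
  else
    let shift : Int := PySem.Int.mod (cs.length : Int) 26 + 1
    let result : List (List Char) :=
      (PySem.List.enumerate (PySem.Chars.lower cs) 0).foldl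
        (fun acc ic =>
          let idx := ic.1
          let c := ic.2
          if PySem.Chars.isalpha c then
            let base : Int := 97  -- ord 'a'
            let shifted : Char :=
              Char.ofNat (PySem.Int.mod ((c.toNat : Int) - base + shift) 26 + base).toNat  -- chr(...)
            if PySem.Int.mod (idx + shift) 7 = 0 then
              let num := PySem.Int.mod ((shifted.toNat : Int) - base + 1) 10
              acc ++ [PySem.Int.toChars num]          -- str(num)
            else acc ++ [[shifted]]
          else acc ++ [[c]]) []
    let s : List Char := PySem.Chars.upper (PySem.Chars.join [] result)
    let flip_freq : Int := 5 + PySem.Int.mod (s.length : Int) 4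
    let parts : List (List Char) :=
      (PySem.List.pyRange 0 (s.length : Int) flip_freq).map
        (fun i => PySem.List.slice s (some i) (some (i + flip_freq)))
    let parts2 :=
      (PySem.List.pyRange 0 (parts.length : Int) 1).foldl
        (fun ps i =>
          if PySem.Int.mod i 2 = 1 then
            -- parts[i] = parts[i][::-1]
            ps.set i.toNat ((PySem.List.slice? (PySem.List.pyGetD ps i []) none none (-1)).getD [])
          else ps) parts
    String.ofList (PySem.Chars.join [] parts2)

-- ===== PORT B =====
-- Source B's nested `enc` (shift captured from the enclosing scope)
def pvEncB (shift : Int) (idx : Int) (ch : Char) : Char :=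
  let c := PySem.Chars.lowerChar ch
  if PySem.Chars.isalpha c then
    let v := PySem.Int.mod ((c.toNat : Int) - 97 + shift) 26
    if PySem.Int.mod (idx + shift) 7 = 0 then
      Char.ofNat (48 + PySem.Int.mod (v + 1) 10).toNat   -- chr(ord('0') + …)
    else
      Char.ofNat (65 + v).toNat                          -- chr(ord('A') + v)
  else ch

-- Source B's `while t:` loop; t[:flip] is `take flip`, and for flip ≥ 1 t[flip:] on
-- x :: rest is `rest.drop (flip - 1)` (both slices have nonnegative literal bounds,
-- where Python slicing is exactly clamped take/drop: PySem.List.slice_natCast).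
def pvChunkLoopB (flip : Nat) (t : List Char) (rev : Bool) : List (List Char) :=
  match t with
  | [] => []
  | x :: rest =>
    let chunk := (x :: rest).take flip
    (if rev then chunk.reverse else chunk) :: pvChunkLoopB flip (rest.drop (flip - 1)) (!rev)
termination_by t.length
decreasing_by
  simp only [List.length_drop, List.length_cons]; omega

def transform_text_alt (text : String) : String :=
  let cs := text.toList
  if cs = [] then text
  else
    let n := cs.length
    let shift : Int := PySem.Int.mod (n : Int) 26 + 1
    let flip : Nat := 5 + n % 4   -- len(text) ≥ 0, so Python's % is Nat %
    let t : List Char := (PySem.List.enumerate cs 0).map (fun ic => pvEncB shift ic.1 ic.2)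
    String.ofList (PySem.Chars.join [] (pvChunkLoopB flip t false))

-- ===== PRECONDITION & SPEC =====
def Spec_transform_text (text : String) (out : String) : Prop := out = transform_text_alt text
instance (text : String) (out : String) : Decidable (Spec_transform_text text out) := by unfold Spec_transform_text; infer_instance

-- ===== CLAIM (what is proved, stated in full; the proofs are below) =====
def Claim_equal_transform_text : Prop := ∀ (text : String), Dom_transform_text text → Spec_transform_text text (transform_text text)



-- ===== LEMMAS AND PROOFS =====

-- A's loop body as a pure per-item function (idx, already-lowered char) ↦ appended string
def pvStepA (shift : Int) (ic : Int × Char) : List Char :=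
  if PySem.Chars.isalpha ic.2 then
    let shifted : Char := Char.ofNat (PySem.Int.mod ((ic.2.toNat : Int) - 97 + shift) 26 + 97).toNat
    if PySem.Int.mod (ic.1 + shift) 7 = 0 then
      PySem.Int.toChars (PySem.Int.mod ((shifted.toNat : Int) - 97 + 1) 10)
    else [shifted]
  else [ic.2]

-- reference chunking and alternating reversal used to connect the two ports
def pvChunksRef (flip : Nat) (t : List Char) : List (List Char) :=
  match t with
  | [] => []
  | x :: rest => (x :: rest).take flip :: pvChunksRef flip (rest.drop (flip - 1))
termination_by t.length
decreasing_by
  simp only [List.length_drop, List.length_cons]; omega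

def pvAltRev (ps : List (List Char)) (rev : Bool) : List (List Char) :=
  match ps with
  | [] => []
  | p :: rest => (if rev then p.reverse else p) :: pvAltRev rest (!rev)

-- one check per (char code, shift-1, idx-witness): kernel-checked table
def pvCharCheck (cn k : Nat) (idx : Int) : Bool :=
  decide ((pvStepA ((k : Int) + 1) (idx, PySem.Chars.lowerChar (Char.ofNat cn))).map
      PySem.Chars.upperChar
    = [pvEncB ((k : Int) + 1) idx (Char.ofNat cn)])

theorem pv_char_fact_aux :
    ((List.range 128).all fun cn =>
      (List.range 26).all fun k =>
        pvCharCheck cn k (-(k : Int) - 1) && pvCharCheck cn k (-(k : Int))) = true := by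
  decide

theorem pv_enumerate_map {α β : Type} (f : α → β) (xs : List α) (s : Int) :
    PySem.List.enumerate (xs.map f) s
      = (PySem.List.enumerate xs s).map (fun p => (p.1, f p.2)) := by
  induction xs generalizing s with
  | nil => simp [PySem.List.enumerate_nil]
  | cons x xs ih => simp [PySem.List.enumerate_cons, ih]

theorem pv_join_nil_flatten (ps : List (List Char)) :
    PySem.Chars.join [] ps = ps.flatten := by
  induction ps with
  | nil => simp [PySem.Chars.join, List.intercalate]
  | cons p ps ih =>
    cases ps with
    | nil => simp [PySem.Chars.join, List.intercalate]
    | cons q qs =>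
      rw [PySem.Chars.join_cons_cons] at *
      simp only [List.flatten_cons] at *
      simp [ih]

theorem pv_flatten_singletons {α β : Type} (g : α → β) (l : List α) :
    (l.map fun p => [g p]).flatten = l.map g := by
  induction l with
  | nil => rfl
  | cons x xs ih => simp [ih]

-- the two step functions depend on idx only through the divisibility test
theorem pv_step_cond_only (shift i j : Int) (c d : Char)
    (h : (PySem.Int.mod (i + shift) 7 = 0) ↔ (PySem.Int.mod (j + shift) 7 = 0)) :
    pvStepA shift (i, c) = pvStepA shift (j, c) ∧ pvEncB shift i d = pvEncB shift j d := by
  unfold pvStepA pvEncB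
  by_cases hi : PySem.Int.mod (i + shift) 7 = 0
  · have hj := h.mp hi
    rw [PySem.Int.mod_eq_zero_iff_dvd] at hi hj
    simp [hi, hj]
  · have hj : ¬ PySem.Int.mod (j + shift) 7 = 0 := fun hh => hi (h.mpr hh)
    rw [PySem.Int.mod_eq_zero_iff_dvd] at hi hj
    simp [hi, hj]

-- the per-char fact: upper ∘ A's step on the lowered char = B's encoder
theorem pv_char_fact (c : Char) (hc : pvDomChar c = true)
    (shift : Int) (h1 : 1 ≤ shift) (h2 : shift ≤ 26) (idx : Int) :
    (pvStepA shift (idx, PySem.Chars.lowerChar c)).map PySem.Chars.upperChar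
      = [pvEncB shift idx c] := by
  have hcn : c.toNat < 128 := by
    simp only [pvDomChar, Bool.or_eq_true, Bool.and_eq_true, decide_eq_true_eq, beq_iff_eq] at hc
    omega
  have hk : (shift - 1).toNat < 26 := by omega
  have hall := pv_char_fact_aux
  simp only [List.all_eq_true, List.mem_range, Bool.and_eq_true] at hall
  have htab := hall c.toNat hcn (shift - 1).toNat hk
  have hsh : (((shift - 1).toNat : Int)) + 1 = shift := by omega
  by_cases hcond : PySem.Int.mod (idx + shift) 7 = 0
  · have ht := htab.1
    simp only [pvCharCheck, decide_eq_true_eq] at ht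
    rw [Char.ofNat_toNat] at ht
    have e1 : (-(((shift - 1).toNat : Int)) - 1) = -shift := by omega
    rw [e1, hsh] at ht
    obtain ⟨hA, hB⟩ := pv_step_cond_only shift idx (-shift) (PySem.Chars.lowerChar c) c (by
      constructor
      · intro _
        rw [show -shift + shift = (0 : Int) by ring]
        decide
      · intro _
        exact hcond)
    rw [hA, hB]
    exact ht
  · have ht := htab.2
    simp only [pvCharCheck, decide_eq_true_eq] at ht
    rw [Char.ofNat_toNat] at ht
    have e2 : (-(((shift - 1).toNat : Int))) = 1 - shift := by omega
    rw [e2, hsh] at ht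
    obtain ⟨hA, hB⟩ := pv_step_cond_only shift idx (1 - shift) (PySem.Chars.lowerChar c) c (by
      constructor
      · intro hh
        exact absurd hh hcond
      · intro hh
        rw [show (1 : Int) - shift + shift = 1 by ring] at hh
        exact absurd hh (by decide))
    rw [hA, hB]
    exact ht

theorem pv_chunks_aux (flip : Nat) (hf : 1 ≤ flip) :
    ∀ (m : Nat) (t : List Char), t.length ≤ m * flip → m * flip < t.length + flip →
    (List.range m).map (fun k => (t.drop (flip * k)).take flip) = pvChunksRef flip t := by
  intro m
  induction m with
  | zero =>
    intro t h1 h2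
    rw [Nat.zero_mul] at h1
    have ht : t = [] := List.eq_nil_of_length_eq_zero (Nat.le_zero.mp h1)
    subst ht
    simp [pvChunksRef]
  | succ m ih =>
    intro t h1 h2
    rw [Nat.succ_mul] at h1 h2
    have ht : t ≠ [] := by
      intro h
      subst h
      simp only [List.length_nil] at h1 h2
      omega
    obtain ⟨x, rest, rfl⟩ := List.exists_cons_of_ne_nil ht
    simp only [List.length_cons] at h1 h2
    have hb1 : ((x :: rest).drop flip).length ≤ m * flip := by
      simp only [List.length_drop, List.length_cons]
      omega
    have hb2 : m * flip < ((x :: rest).drop flip).length + flip := by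
      simp only [List.length_drop, List.length_cons]
      omega
    rw [List.range_succ_eq_map]
    simp only [List.map_cons, List.map_map, Nat.mul_zero, List.drop_zero]
    rw [pvChunksRef]
    congr 1
    have hdrop : rest.drop (flip - 1) = (x :: rest).drop flip := by
      cases flip with
      | zero => omega
      | succ n => simp [List.drop_succ_cons]
    rw [hdrop]
    rw [← ih ((x :: rest).drop flip) hb1 hb2]
    apply List.map_congr_left
    intro k _
    simp only [Function.comp_apply]
    rw [List.drop_drop]
    congr 2
    rw [Nat.mul_succ]
    omega

theorem pv_parts_eq (t : List Char) (flip : Nat) (hf : 5 ≤ flip) :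
    (PySem.List.pyRange 0 (t.length : Int) (flip : Int)).map
        (fun i => PySem.List.slice t (some i) (some (i + (flip : Int))))
      = pvChunksRef flip t := by
  have hfpos : (0 : Int) < (flip : Int) := by exact_mod_cast Nat.lt_of_lt_of_le (by omega) hf
  rw [PySem.List.pyRange_of_pos 0 (t.length : Int) hfpos]
  by_cases hlen : t = []
  · subst hlen
    simp [pvChunksRef]
  · have hN : 0 < t.length := List.length_pos_iff.mpr hlen
    have hlt : (0 : Int) < (t.length : Int) := by exact_mod_cast hN
    rw [if_pos hlt]
    have hdiv : (((t.length : Int) - 0 + (flip : Int) - 1) / (flip : Int)).toNat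
        = (t.length + flip - 1) / flip := by
      have h0 : ((t.length : Int) - 0 + (flip : Int) - 1) = ((t.length + flip - 1 : Nat) : Int) := by
        push_cast
        omega
      rw [h0, ← Int.natCast_div, Int.toNat_natCast]
    rw [hdiv]
    have hself := Nat.div_add_mod (t.length + flip - 1) flip
    have hmlt := Nat.mod_lt (t.length + flip - 1) (show 0 < flip by omega)
    have hcomm : flip * ((t.length + flip - 1) / flip) = ((t.length + flip - 1) / flip) * flip :=
      Nat.mul_comm _ _
    rw [List.map_map]
    rw [← pv_chunks_aux flip (by omega) ((t.length + flip - 1) / flip) t (by omega) (by omega)]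
    apply List.map_congr_left
    intro k _
    simp only [Function.comp_apply, zero_add]
    have hcast : (flip : Int) * (k : Int) = ((flip * k : Nat) : Int) := by
      push_cast
      ring
    rw [hcast]
    exact PySem.List.slice_natCast_add t (flip * k) flip

theorem pv_set_append (pre : List (List Char)) (p q : List Char) (rest : List (List Char)) :
    (pre ++ p :: rest).set pre.length q = pre ++ q :: rest := by
  induction pre with
  | nil => rfl
  | cons a l ih => simp [ih]

theorem pv_getD_append (pre : List (List Char)) (p : List Char) (rest : List (List Char)) :
    PySem.List.pyGetD (pre ++ p :: rest) ((pre.length : Nat) : Int) [] = p := by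
  rw [PySem.List.pyGetD_natCast]
  rw [List.getD_eq_getElem?_getD]
  rw [List.getElem?_append_right (le_refl _)]
  simp

theorem pv_setloop_aux (ps : List (List Char)) :
    ∀ (pre : List (List Char)),
    (PySem.List.pyRange (pre.length : Int) ((pre.length : Int) + ps.length) 1).foldl
        (fun qs i =>
          if PySem.Int.mod i 2 = 1 then
            qs.set i.toNat ((PySem.List.slice? (PySem.List.pyGetD qs i []) none none (-1)).getD [])
          else qs) (pre ++ ps)
      = pre ++ pvAltRev ps (decide (pre.length % 2 = 1)) := by
  induction ps with
  | nil =>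
    intro pre
    rw [PySem.List.pyRange_one_eq_nil (by simp)]
    simp [pvAltRev]
  | cons p rest ih =>
    intro pre
    rw [PySem.List.pyRange_one_cons (by push_cast [List.length_cons]; omega)]
    simp only [List.foldl_cons]
    have hget := pv_getD_append pre p rest
    have htn : ((pre.length : Int)).toNat = pre.length := by omega
    by_cases hpar : pre.length % 2 = 1
    · have hcond : PySem.Int.mod (pre.length : Int) 2 = 1 := by
        rw [PySem.Int.mod_eq_emod_of_pos (by omega)]
        omega
      rw [if_pos hcond, hget, PySem.List.slice?_none_none_neg_one]
      simp only [Option.getD_some]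
      rw [htn, pv_set_append]
      have hsplit : pre ++ p.reverse :: rest = (pre ++ [p.reverse]) ++ rest := by simp
      rw [hsplit]
      have hstart : (pre.length : Int) + 1 = (((pre ++ [p.reverse]).length : Nat) : Int) := by
        simp
      have hstop : (pre.length : Int) + ((p :: rest).length : Int)
          = (((pre ++ [p.reverse]).length : Nat) : Int) + (rest.length : Int) := by
        simp only [List.length_append, List.length_cons, List.length_nil]
        push_cast
        omega
      rw [hstart, hstop, ih (pre ++ [p.reverse])]
      have hd1 : (decide ((pre ++ [p.reverse]).length % 2 = 1)) = false := by
        simp only [List.length_append, List.length_singleton, decide_eq_false_iff_not]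
        omega
      rw [hd1]
      simp [pvAltRev, hpar]
    · have hcond : ¬ PySem.Int.mod (pre.length : Int) 2 = 1 := by
        rw [PySem.Int.mod_eq_emod_of_pos (by omega)]
        omega
      rw [if_neg hcond]
      have hsplit : pre ++ p :: rest = (pre ++ [p]) ++ rest := by simp
      rw [hsplit]
      have hstart : (pre.length : Int) + 1 = (((pre ++ [p]).length : Nat) : Int) := by
        simp
      have hstop : (pre.length : Int) + ((p :: rest).length : Int)
          = (((pre ++ [p]).length : Nat) : Int) + (rest.length : Int) := by
        simp only [List.length_append, List.length_cons, List.length_nil]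
        push_cast
        omega
      rw [hstart, hstop, ih (pre ++ [p])]
      have hd2 : (decide ((pre ++ [p]).length % 2 = 1)) = true := by
        simp only [List.length_append, List.length_singleton, decide_eq_true_eq]
        omega
      rw [hd2]
      simp [pvAltRev, hpar]

theorem pv_setloop_eq (ps : List (List Char)) :
    (PySem.List.pyRange 0 (ps.length : Int) 1).foldl
        (fun qs i =>
          if PySem.Int.mod i 2 = 1 then
            qs.set i.toNat ((PySem.List.slice? (PySem.List.pyGetD qs i []) none none (-1)).getD [])
          else qs) ps
      = pvAltRev ps false := by
  have h := pv_setloop_aux ps []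
  simpa using h

theorem pv_chunkLoop_eq (flip : Nat) (t : List Char) (rev : Bool) :
    pvChunkLoopB flip t rev = pvAltRev (pvChunksRef flip t) rev := by
  fun_induction pvChunkLoopB flip t rev with
  | case1 => simp [pvChunksRef, pvAltRev]
  | case2 flip x rest rev ih =>
    rw [pvChunksRef]
    simp only [pvAltRev]
    rw [ih]

-- ===== VERDICT (by name: the statement is the Claim_ definition above) =====
theorem transform_text_spec : Claim_equal_transform_text := by
  intro text hdom
  unfold Spec_transform_text
  by_cases hnil : text.toList = []
  · simp [transform_text, transform_text_alt, hnil]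
  · set cs := text.toList with hcs
    set N := cs.length with hN
    set shift : Int := PySem.Int.mod (N : Int) 26 + 1 with hshift
    set flip : Nat := 5 + N % 4 with hflip
    have hmod26 : PySem.Int.mod (N : Int) 26 = ((N % 26 : Nat) : Int) :=
      PySem.Int.mod_natCast N 26
    have hsh1 : 1 ≤ shift := by
      rw [hshift, hmod26]
      omega
    have hsh2 : shift ≤ 26 := by
      rw [hshift, hmod26]
      have := Nat.mod_lt N (show 0 < 26 by omega)
      omega
    have hdomc : ∀ c ∈ cs, pvDomChar c = true := by
      intro c hcm
      have hds : pvDomStr text = true := hdom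
      rw [pvDomStr, List.all_eq_true] at hds
      exact hds c hcm
    have hbody : (fun (acc : List (List Char)) (ic : Int × Char) =>
          if PySem.Chars.isalpha ic.2 then
            let base : Int := 97
            let shifted : Char :=
              Char.ofNat (PySem.Int.mod ((ic.2.toNat : Int) - base + shift) 26 + base).toNat
            if PySem.Int.mod (ic.1 + shift) 7 = 0 then
              let num := PySem.Int.mod ((shifted.toNat : Int) - base + 1) 10
              acc ++ [PySem.Int.toChars num]
            else acc ++ [[shifted]]
          else acc ++ [[ic.2]])
        = (fun acc ic => acc ++ [pvStepA shift ic]) := by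
      funext acc ic
      simp only [pvStepA]
      split_ifs <;> rfl
    have hs : PySem.Chars.upper (PySem.Chars.join []
        ((PySem.List.enumerate (PySem.Chars.lower cs) 0).foldl
          (fun acc ic =>
            if PySem.Chars.isalpha ic.2 then
              let base : Int := 97
              let shifted : Char :=
                Char.ofNat (PySem.Int.mod ((ic.2.toNat : Int) - base + shift) 26 + base).toNat
              if PySem.Int.mod (ic.1 + shift) 7 = 0 then
                let num := PySem.Int.mod ((shifted.toNat : Int) - base + 1) 10
                acc ++ [PySem.Int.toChars num]
              else acc ++ [[shifted]]
            else acc ++ [[ic.2]]) []))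
        = (PySem.List.enumerate cs 0).map (fun ic => pvEncB shift ic.1 ic.2) := by
      rw [hbody, PySem.List.foldl_append_singleton_eq_map, List.nil_append]
      rw [show PySem.Chars.lower cs = cs.map PySem.Chars.lowerChar from rfl]
      rw [pv_enumerate_map, List.map_map]
      rw [pv_join_nil_flatten]
      rw [show PySem.Chars.upper = List.map PySem.Chars.upperChar from rfl]
      rw [List.map_flatten, List.map_map]
      have hcongr : ∀ p ∈ PySem.List.enumerate cs 0,
          ((List.map PySem.Chars.upperChar ∘
              (pvStepA shift ∘ fun p => (p.1, PySem.Chars.lowerChar p.2))) p)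
            = (fun p => [pvEncB shift p.1 p.2]) p := by
        intro p hp
        obtain ⟨k, hk, rfl⟩ := (PySem.List.mem_enumerate_iff cs 0 p).mp hp
        simp only [Function.comp_apply]
        exact pv_char_fact cs[k] (hdomc _ (List.getElem_mem hk)) shift hsh1 hsh2 _
      rw [List.map_congr_left hcongr]
      exact pv_flatten_singletons _ _
    simp only [transform_text, transform_text_alt, if_neg hnil, ← hcs, ← hN, ← hshift]
    rw [hs]
    set t : List Char := (PySem.List.enumerate cs 0).map (fun ic => pvEncB shift ic.1 ic.2)
      with hts
    have htlen : t.length = N := by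
      rw [hts, List.length_map, PySem.List.length_enumerate]
    have hflipcast : 5 + PySem.Int.mod ((t.length : Nat) : Int) 4 = ((flip : Nat) : Int) := by
      rw [htlen, hflip, PySem.Int.mod_eq_emod_of_pos (by omega)]
      omega
    rw [hflipcast]
    have hf5 : 5 ≤ flip := by omega
    rw [pv_parts_eq t flip hf5]
    rw [pv_setloop_eq]
    rw [pv_chunkLoop_eq]
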